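-- pv_equiv track=rewrite | github.com/Yan-99/PharmCalc | project/project.py | cal_smoke_points_M
-- ===== SOURCE A (Python) =====
-- def cal_smoke_points_M(smoke, age):
--     smoking_points = 0
--     smoke = smoke.upper()
--     if smoke == "N":
--         smoking_points = 0
--         return smoking_points
--     else:
--         smoking_dict = {(20, 39): 8,(40, 49): 5,(50, 59): 3,(60, 69): 1,(70, 79): 1}
--
--         for (start, end), value in smoking_dict.items():
--             if start <= age <= end:
--                 smoking_points = value
--             if age < 20:
--                 smoking_points = 8
--             if age > 79:
--                 smoking_points = 1
--     return smoking_points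
-- ===== SOURCE B (Python) =====
-- def cal_smoke_points_M(smoke, age):
--     if smoke.upper() == "N":
--         return 0
--     if age <= 39:
--         return 8
--     if age <= 49:
--         return 5
--     if age <= 59:
--         return 3
--     return 1
-- ===== Notes on version B (the rewrite author's own statement) =====
-- stated objective: simpler
-- what changed: Replaced the range-keyed dict and the per-entry loop (with its repeated <20 / >79 re-checks inside every iteration) by a direct threshold cascade on age; integer ages leave no gaps so the table disappears.
import Mathlib
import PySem

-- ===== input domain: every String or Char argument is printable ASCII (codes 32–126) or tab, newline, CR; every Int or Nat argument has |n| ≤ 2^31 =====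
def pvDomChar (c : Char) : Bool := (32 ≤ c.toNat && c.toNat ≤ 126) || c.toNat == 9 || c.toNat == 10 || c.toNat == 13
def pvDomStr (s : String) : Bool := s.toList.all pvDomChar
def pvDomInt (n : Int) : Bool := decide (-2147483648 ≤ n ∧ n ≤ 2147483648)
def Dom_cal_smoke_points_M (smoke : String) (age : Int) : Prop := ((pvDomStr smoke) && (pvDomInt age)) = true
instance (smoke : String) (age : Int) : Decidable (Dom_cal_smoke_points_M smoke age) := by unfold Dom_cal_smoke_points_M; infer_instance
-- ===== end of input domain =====

-- ===== PORT A =====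
-- B replaces the dict+loop with a direct threshold cascade on age (simpler; same values).
def cal_smoke_points_M (smoke : String) (age : Int) : Int :=
  -- smoking_points = 0; smoke = smoke.upper(); if smoke == "N": return 0
  let smoke := PySem.Str.upper smoke
  if smoke == "N" then 0
  else
    -- smoking_dict items in insertion order; loop body per entry
    let smoking_dict : List ((Int × Int) × Int) :=
      [((20, 39), 8), ((40, 49), 5), ((50, 59), 3), ((60, 69), 1), ((70, 79), 1)]
    smoking_dict.foldl (fun smoking_points (se : (Int × Int) × Int) =>
      let (r, value) := se
      let (start, «end») := r
      let smoking_points := if start ≤ age ∧ age ≤ «end» then value else smoking_points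
      let smoking_points := if age < 20 then 8 else smoking_points
      if age > 79 then 1 else smoking_points) 0

-- ===== PORT B =====
def cal_smoke_points_M_alt (smoke : String) (age : Int) : Int :=
  if PySem.Str.upper smoke == "N" then 0
  else if age ≤ 39 then 8
  else if age ≤ 49 then 5
  else if age ≤ 59 then 3
  else 1

-- ===== PRECONDITION & SPEC =====
def Spec_cal_smoke_points_M (smoke : String) (age : Int) (out : Int) : Prop := out = cal_smoke_points_M_alt smoke age
instance (smoke : String) (age : Int) (out : Int) : Decidable (Spec_cal_smoke_points_M smoke age out) := by unfold Spec_cal_smoke_points_M; infer_instance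

-- ===== CLAIM (what is proved, stated in full; the proofs are below) =====
def Claim_equal_cal_smoke_points_M : Prop := ∀ (smoke : String) (age : Int), Dom_cal_smoke_points_M smoke age → Spec_cal_smoke_points_M smoke age (cal_smoke_points_M smoke age)

-- ===== LEMMAS AND PROOFS =====

-- ===== VERDICT (by name: the statement is the Claim_ definition above) =====
theorem cal_smoke_points_M_spec : Claim_equal_cal_smoke_points_M := by
  intro smoke age _
  unfold Spec_cal_smoke_points_M cal_smoke_points_M cal_smoke_points_M_alt
  by_cases h : PySem.Str.upper smoke == "N"
  · simp [h]
  · simp only [h, if_false, Bool.false_eq_true, List.foldl]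
    split_ifs <;> omega
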